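-- pv_equiv track=rewrite | github.com/MrBrantCode/unitest_baseline | mut_generate/mist_train_cf/cf_69094/solution.py | validate_subset_and_substrings
-- ===== SOURCE A (Python) =====
-- def validate_subset_and_substrings(group1, group2):
--     def get_substrings(input_string):
--         length = len(input_string)
--         return set(input_string[i:j+1] for i in range(length) for j in range(i+2, length))
--
--     # Handle non-string elements in group1
--     if any(not isinstance(i, str) for i in group1):
--         return False
--
--     # Handle non-string elements in group2
--     if any(not isinstance(i, str) for i in group2):
--         return False
--
--     # Group1 is empty
--     if not group1:
--         return True
--
--     # Group2 is empty but Group1 is not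
--     if not group2:
--         return False
--
--     # Lowercase all elements in both groups for case insensitivity
--     lower_group1 = [i.lower() for i in group1]
--     lower_group2 = [i.lower() for i in group2]
--
--     # Check if group1 is a subset of group2
--     if not set(lower_group1).issubset(set(lower_group2)):
--         return False
--
--     # Check for common substring of length 3 in each element of group1
--     for elem in lower_group1:
--         substrings = get_substrings(elem)
--         if all(not any(substr in item for substr in substrings) for item in lower_group2):
--             return False
--
--     return True
-- ===== SOURCE B (Python) =====
-- def validate_subset_and_substrings(group1, group2):
--     if any(not isinstance(i, str) for i in group1):
--         return False
--     if any(not isinstance(i, str) for i in group2):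
--         return False
--     if not group1:
--         return True
--     if not group2:
--         return False
--     lower_group2 = {s.lower() for s in group2}
--     # Membership of elem.lower() in group2 already guarantees a shared length-3
--     # substring (elem itself) whenever len(elem) >= 3; shorter elems have none.
--     return all(s.lower() in lower_group2 and len(s) >= 3 for s in group1)
-- ===== Notes on version B (the rewrite author's own statement) =====
-- stated objective: faster
-- what changed: Replaced the per-element O(L^3) substring-set generation and nested scan over group2 by a single pass testing membership of the lowered element in a set of lowered group2 plus len>=3, which is equivalent because the subset condition makes the element itself the shared substring.
import Mathlib
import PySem

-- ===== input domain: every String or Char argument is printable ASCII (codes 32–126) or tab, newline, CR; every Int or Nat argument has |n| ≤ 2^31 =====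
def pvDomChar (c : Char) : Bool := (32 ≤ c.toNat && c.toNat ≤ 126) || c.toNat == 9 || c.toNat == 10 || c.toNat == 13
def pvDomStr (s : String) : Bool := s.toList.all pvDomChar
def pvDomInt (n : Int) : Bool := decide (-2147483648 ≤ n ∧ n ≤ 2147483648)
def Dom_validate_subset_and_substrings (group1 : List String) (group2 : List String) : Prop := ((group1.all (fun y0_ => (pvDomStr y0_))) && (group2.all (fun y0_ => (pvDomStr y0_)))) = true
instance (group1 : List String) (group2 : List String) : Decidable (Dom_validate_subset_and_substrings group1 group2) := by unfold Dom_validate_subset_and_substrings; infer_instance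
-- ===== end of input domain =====

-- B replaces A's per-element substring-set enumeration and scan of group2 by a single
-- membership-plus-length test per element (faster in a timing run's measurement).

-- ===== PORT A =====
-- get_substrings: {input_string[i:j+1] for i in range(length) for j in range(i+2, length)}
def pvGetSubstrings (s : String) : PySem.Set String :=
  let length : Int := PySem.Str.len s
  PySem.Set.ofList ((PySem.List.pyRange 0 length 1).flatMap (fun i =>
    (PySem.List.pyRange (i + 2) length 1).map (fun j => PySem.Str.slice s (some i) (some (j + 1)))))

-- The two isinstance guards of A are identically False under the List String typing and are omitted.
def validate_subset_and_substrings (group1 : List String) (group2 : List String) : Bool :=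
  if group1 = [] then true
  else if group2 = [] then false
  else
    let lower_group1 := group1.map PySem.Str.lower
    let lower_group2 := group2.map PySem.Str.lower
    if !(PySem.Set.issubset (PySem.Set.ofList lower_group1) (PySem.Set.ofList lower_group2)) then false
    else
      lower_group1.all (fun elem =>
        let substrings := pvGetSubstrings elem
        !(lower_group2.all (fun item => !(substrings.any (fun substr => PySem.Str.isIn substr item)))))

-- ===== PORT B =====
def validate_subset_and_substrings_alt (group1 : List String) (group2 : List String) : Bool :=
  if group1 = [] then true
  else if group2 = [] then false
  else
    let lower_group2 : PySem.Set String := PySem.Set.ofList (group2.map PySem.Str.lower)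
    group1.all (fun s =>
      PySem.Set.contains lower_group2 (PySem.Str.lower s) && decide (3 ≤ PySem.Str.len s))

-- ===== PRECONDITION & SPEC =====
def Spec_validate_subset_and_substrings (group1 : List String) (group2 : List String) (out : Bool) : Prop := out = validate_subset_and_substrings_alt group1 group2
instance (group1 : List String) (group2 : List String) (out : Bool) : Decidable (Spec_validate_subset_and_substrings group1 group2 out) := by unfold Spec_validate_subset_and_substrings; infer_instance

-- ===== CLAIM (what is proved, stated in full; the proofs are below) =====
def Claim_equal_validate_subset_and_substrings : Prop := ∀ (group1 : List String) (group2 : List String), Dom_validate_subset_and_substrings group1 group2 → Spec_validate_subset_and_substrings group1 group2 (validate_subset_and_substrings group1 group2)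

-- ===== LEMMAS AND PROOFS =====

theorem getSubstrings_nil (s : String) (h : s.length < 3) : pvGetSubstrings s = [] := by
  simp only [pvGetSubstrings]
  have hn : ∀ i ∈ PySem.List.pyRange 0 (PySem.Str.len s) 1,
      (PySem.List.pyRange (i + 2) (PySem.Str.len s) 1).map
        (fun j => PySem.Str.slice s (some i) (some (j + 1))) = [] := by
    intro i hi
    rw [PySem.List.mem_pyRange_one] at hi
    rw [PySem.List.pyRange_one_eq_nil]
    · simp
    · simp only [PySem.Str.len_eq, String.length_toList] at hi ⊢
      omega
  rw [List.flatMap_eq_nil_iff.mpr hn]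
  rfl

theorem self_mem_getSubstrings (s : String) (h : 3 ≤ s.length) : s ∈ pvGetSubstrings s := by
  simp only [pvGetSubstrings]
  rw [PySem.Set.mem_ofList, List.mem_flatMap]
  refine ⟨0, ?_, ?_⟩
  · rw [PySem.List.mem_pyRange_one]
    simp only [PySem.Str.len_eq, String.length_toList]; omega
  · rw [List.mem_map]
    refine ⟨PySem.Str.len s - 1, ?_, ?_⟩
    · rw [PySem.List.mem_pyRange_one]
      simp only [PySem.Str.len_eq, String.length_toList]; omega
    · apply String.toList_inj.mp
      simp [pysem]

theorem inner_eq (elem : String) (l2 : List String) (hmem : elem ∈ l2) :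
    (!(l2.all (fun item => !((pvGetSubstrings elem).any (fun substr => PySem.Str.isIn substr item)))))
      = decide (3 ≤ PySem.Str.len elem) := by
  by_cases h : 3 ≤ elem.length
  · have hself : elem ∈ pvGetSubstrings elem := self_mem_getSubstrings elem h
    have hfalse : l2.all (fun item => !((pvGetSubstrings elem).any (fun substr => PySem.Str.isIn substr item))) = false := by
      rw [List.all_eq_false]
      refine ⟨elem, hmem, ?_⟩
      simp only [Bool.not_eq_true']
      rw [Bool.not_eq_false, List.any_eq_true]
      exact ⟨elem, hself, by rw [PySem.Str.isIn_iff_infix]⟩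
    rw [hfalse]
    simp only [PySem.Str.len_eq, String.length_toList]
    simp [h]
  · rw [getSubstrings_nil elem (by omega)]
    simp only [PySem.Str.len_eq, String.length_toList]
    simp [h]
theorem pvAllCongrMem {α : Type} {l : List α} {p q : α → Bool} (h : ∀ x ∈ l, p x = q x) :
    l.all p = l.all q := by
  induction l with
  | nil => rfl
  | cons a t ih => simp only [List.all_cons, h a (by simp), ih (fun x hx => h x (by simp [hx]))]

theorem len_lower (s : String) : PySem.Str.len (PySem.Str.lower s) = PySem.Str.len s := by
  simp [pysem, PySem.Chars.lower]

theorem main_eq (g1 g2 : List String) :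
    validate_subset_and_substrings g1 g2 = validate_subset_and_substrings_alt g1 g2 := by
  simp only [validate_subset_and_substrings, validate_subset_and_substrings_alt]
  by_cases h1 : g1 = []
  · simp [h1]
  by_cases h2 : g2 = []
  · simp [h1, h2]
  simp only [if_neg h1, if_neg h2]
  by_cases hs : PySem.Set.issubset (PySem.Set.ofList (g1.map PySem.Str.lower))
      (PySem.Set.ofList (g2.map PySem.Str.lower)) = true
  · rw [hs]
    simp only [Bool.not_true, Bool.false_eq_true, if_false, List.all_map]
    have hsub := (PySem.Set.issubset_iff _ _).mp hs
    apply pvAllCongrMem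
    intro s hsmem
    have hl2 : PySem.Str.lower s ∈ List.map PySem.Str.lower g2 :=
      (PySem.Set.mem_ofList _ _).mp
        (hsub _ ((PySem.Set.mem_ofList _ _).mpr (List.mem_map_of_mem hsmem)))
    simp only [Function.comp_apply, ← List.all_map]
    have hrw := inner_eq (PySem.Str.lower s) (List.map PySem.Str.lower g2) hl2
    rw [hrw, len_lower]
    have : PySem.Set.contains (PySem.Set.ofList (g2.map PySem.Str.lower)) (PySem.Str.lower s) = true := by
      rw [PySem.Set.contains_iff, PySem.Set.mem_ofList]
      exact hl2
    rw [this, Bool.true_and]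
  · rw [Bool.not_eq_true] at hs
    rw [hs]
    simp only [Bool.not_false, if_true]
    have hex : ¬ ∀ x ∈ PySem.Set.ofList (g1.map PySem.Str.lower), x ∈ PySem.Set.ofList (g2.map PySem.Str.lower) := by
      intro hall
      rw [← PySem.Set.issubset_iff] at hall
      rw [hall] at hs
      exact Bool.noConfusion hs
    push Not at hex
    obtain ⟨x, hx1, hx2⟩ := hex
    rw [PySem.Set.mem_ofList] at hx1
    obtain ⟨t, ht, rfl⟩ := List.mem_map.mp hx1
    symm
    rw [List.all_eq_false]
    refine ⟨t, ht, ?_⟩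
    have hc : PySem.Set.contains (PySem.Set.ofList (g2.map PySem.Str.lower)) (PySem.Str.lower t) = false := by
      rw [Bool.eq_false_iff]
      intro hcon
      exact hx2 ((PySem.Set.contains_iff _ _).mp hcon)
    rw [Bool.not_eq_true, hc, Bool.false_and]

-- ===== VERDICT (by name: the statement is the Claim_ definition above) =====
theorem validate_subset_and_substrings_spec : Claim_equal_validate_subset_and_substrings := by
  intro g1 g2 _
  unfold Spec_validate_subset_and_substrings
  exact main_eq g1 g2
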